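-- pv_equiv track=rewrite | github.com/jdarov/PY_110 | STUDY_GUIDE/Problem7.py | list_of_occuring_tuples
-- ===== SOURCE A (Python) =====
-- def list_of_occuring_tuples(list_of_ints):
--     used_number_indexes = set()
--     occuring_tuples = list()
--     for x in range(len(list_of_ints)):
--         for y in range(x+1, len(list_of_ints)):
--             if (list_of_ints[x] == list_of_ints[y]
--                 and x not in used_number_indexes
--                 and y not in used_number_indexes):
--                     occuring_tuples.append((list_of_ints[x], list_of_ints[y]))
--                     used_number_indexes.add(x)
--                     used_number_indexes.add(y)
--     return occuring_tuples
-- ===== SOURCE B (Python) =====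
-- def list_of_occuring_tuples(list_of_ints):
--     # One pass to count each value, one pass to emit a pair at every
--     # even-rank occurrence that still has a partner later in the list.
--     counts = {}
--     for v in list_of_ints:
--         counts[v] = counts.get(v, 0) + 1
--     result = []
--     seen = {}
--     for v in list_of_ints:
--         r = seen.get(v, 0)
--         if r % 2 == 0 and r + 1 < counts[v]:
--             result.append((v, v))
--         seen[v] = r + 1
--     return result
-- ===== Notes on version B (the rewrite author's own statement) =====
-- stated objective: faster
-- what changed: Replaced the quadratic nested index scan with a used-index set by two linear passes over the values: a counting dict, then a single pass that emits a pair at every even-rank occurrence that still has a later partner.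
import Mathlib
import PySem

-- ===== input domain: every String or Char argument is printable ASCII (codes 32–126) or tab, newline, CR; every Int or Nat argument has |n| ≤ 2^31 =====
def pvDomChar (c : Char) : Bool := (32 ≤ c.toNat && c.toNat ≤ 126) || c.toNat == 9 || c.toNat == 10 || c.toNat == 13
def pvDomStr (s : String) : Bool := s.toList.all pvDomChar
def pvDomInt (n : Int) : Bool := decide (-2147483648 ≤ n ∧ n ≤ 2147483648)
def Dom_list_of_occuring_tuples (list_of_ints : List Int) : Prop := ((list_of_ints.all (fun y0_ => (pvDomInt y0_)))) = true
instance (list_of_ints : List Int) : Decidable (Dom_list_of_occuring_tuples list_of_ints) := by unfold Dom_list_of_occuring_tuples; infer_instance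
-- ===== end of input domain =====

-- B replaces A's quadratic nested index scan by two linear passes (count dict, then
-- emit a pair at each even-rank occurrence that still has a later partner): faster.


-- ===== PORT A =====
-- inner loop body of A (helper; indices come from range(len(..)), so pyGetD's default is never used)
def innerF (l : List Int) (x : Int) (st : PySem.Set Int × List (Int × Int)) (y : Int) :
    PySem.Set Int × List (Int × Int) :=
  if PySem.List.pyGetD l x 0 == PySem.List.pyGetD l y 0
      && !(PySem.Set.contains st.1 x) && !(PySem.Set.contains st.1 y) then
    (PySem.Set.add (PySem.Set.add st.1 x) y,
     st.2 ++ [(PySem.List.pyGetD l x 0, PySem.List.pyGetD l y 0)])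
  else st

def list_of_occuring_tuples (list_of_ints : List Int) : List (Int × Int) :=
  ((PySem.List.pyRange 0 (PySem.List.len list_of_ints) 1).foldl
      (fun st x =>
        (PySem.List.pyRange (x + 1) (PySem.List.len list_of_ints) 1).foldl
          (innerF list_of_ints x) st)
      (PySem.Set.empty, [])).2

-- ===== PORT B =====
def list_of_occuring_tuples_alt (list_of_ints : List Int) : List (Int × Int) :=
  let counts := list_of_ints.foldl (fun d v => d.insert v (d.getD v 0 + 1)) PySem.Dict.empty
  (list_of_ints.foldl
      (fun (st : List (Int × Int) × PySem.Dict Int Int) v =>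
        let r := st.2.getD v 0
        ((if PySem.Int.mod r 2 == 0 && decide (r + 1 < counts.getD v 0) then
            st.1 ++ [(v, v)] else st.1),
         st.2.insert v (r + 1)))
      ([], PySem.Dict.empty)).1

-- ===== PRECONDITION & SPEC =====
def Spec_list_of_occuring_tuples (list_of_ints : List Int) (out : List (Int × Int)) : Prop := out = list_of_occuring_tuples_alt list_of_ints
instance (list_of_ints : List Int) (out : List (Int × Int)) : Decidable (Spec_list_of_occuring_tuples list_of_ints out) := by unfold Spec_list_of_occuring_tuples; infer_instance

-- ===== CLAIM (what is proved, stated in full; the proofs are below) =====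
def Claim_equal_list_of_occuring_tuples : Prop := ∀ (list_of_ints : List Int), Dom_list_of_occuring_tuples list_of_ints → Spec_list_of_occuring_tuples list_of_ints (list_of_occuring_tuples list_of_ints)

-- ===== LEMMAS AND PROOFS =====

-- Common specification: walking the list with processed prefix p, emit (v,v) at each
-- occurrence whose rank (count of v in p) is even and which has a partner later on.
def specGo : List Int → List Int → List (Int × Int)
  | _, [] => []
  | p, v :: t =>
      (if p.count v % 2 == 0 && decide (v ∈ t) then [(v, v)] else []) ++ specGo (p ++ [v]) t

-- characterization of A's used-index set after the outer loop has processed indices < a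
def usedBool (l : List Int) (a : Nat) (j : Int) : Bool :=
  if 0 ≤ j ∧ j.toNat < l.length then
    (if (l.take j.toNat).count (l.getD j.toNat 0) % 2 == 0 then
      decide (j.toNat < a) &&
        decide ((l.take j.toNat).count (l.getD j.toNat 0) + 1 < l.count (l.getD j.toNat 0))
    else decide ((l.take j.toNat).count (l.getD j.toNat 0) ≤ (l.take a).count (l.getD j.toNat 0)))
  else false

-- ---- B side ----
lemma B_loop (cnt : PySem.Dict Int Int) :
    ∀ (rest p : List Int) (res : List (Int × Int)) (seen : PySem.Dict Int Int),
    (∀ v : Int, seen.getD v 0 = (p.count v : Int)) →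
    (∀ v : Int, v ∈ rest → cnt.getD v 0 = ((p ++ rest).count v : Int)) →
    (rest.foldl
        (fun (st : List (Int × Int) × PySem.Dict Int Int) v =>
          let r := st.2.getD v 0
          ((if PySem.Int.mod r 2 == 0 && decide (r + 1 < cnt.getD v 0) then
              st.1 ++ [(v, v)] else st.1),
           st.2.insert v (r + 1)))
        (res, seen)).1 = res ++ specGo p rest := by
  intro rest
  induction rest with
  | nil => intro p res seen _ _; simp [specGo]
  | cons v t ih =>
    intro p res seen h1 h2
    have hr : seen.getD v 0 = (p.count v : Int) := h1 v
    have hc : cnt.getD v 0 = ((p ++ v :: t).count v : Int) := h2 v (List.mem_cons_self ..)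
    have hcnt : ((p ++ v :: t).count v : Int) = (p.count v : Int) + 1 + (t.count v : Int) := by
      simp [List.count_append]; ring
    have hdec : decide (seen.getD v 0 + 1 < cnt.getD v 0) = decide (v ∈ t) := by
      rw [hr, hc, hcnt]
      by_cases hm : v ∈ t
      · simp [hm]
      · simp [hm, List.count_eq_zero_of_not_mem hm]
    have hmod : (PySem.Int.mod (seen.getD v 0) 2 == 0) = (p.count v % 2 == 0) := by
      rw [hr]
      have h2c := PySem.Int.mod_natCast (p.count v) 2
      push_cast at h2c
      rw [h2c]
      by_cases he : p.count v % 2 = 0 <;> simp [he] <;> omega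
    simp only [List.foldl, hdec, hmod]
    have hseen : ∀ w : Int, (seen.insert v (seen.getD v 0 + 1)).getD w 0 = (((p ++ [v]).count w : Nat) : Int) := by
      intro w
      rw [PySem.Dict.getD_insert]
      by_cases hw : w = v
      · simp [hw, hr, List.count_append]
      · simp [hw, h1 w, List.count_append, List.count_singleton]
        intro h; exact absurd h.symm hw
    have h2' : ∀ w : Int, w ∈ t → cnt.getD w 0 = (((p ++ [v]) ++ t).count w : Int) := by
      intro w hw; rw [h2 w (List.mem_cons_of_mem _ hw)]; simp
    have := ih (p ++ [v]) (if p.count v % 2 == 0 && decide (v ∈ t) then res ++ [(v, v)] else res)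
      (seen.insert v (seen.getD v 0 + 1)) hseen h2'
    rw [this, specGo]
    by_cases hcond : (p.count v % 2 == 0 && decide (v ∈ t)) = true <;> simp [hcond]

lemma B_eq_spec (l : List Int) : list_of_occuring_tuples_alt l = specGo [] l := by
  unfold list_of_occuring_tuples_alt
  rw [B_loop _ l [] [] PySem.Dict.empty]
  · simp
  · intro v; simp [PySem.Dict.getD_empty]
  · intro v _
    rw [PySem.Dict.getD_foldl_insert_add_one]
    simp [PySem.Dict.getD_empty]

-- ---- A side: inner loop ----
lemma inner_noop_used (l : List Int) (x : Int) (st : PySem.Set Int × List (Int × Int))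
    (h : PySem.Set.contains st.1 x = true) (ys : List Int) :
    ys.foldl (innerF l x) st = st := by
  have h' : x ∈ st.1 := by simpa using h
  induction ys with
  | nil => rfl
  | cons y ys ih => simpa [List.foldl, innerF, h'] using ih

lemma inner_noop_nomatch (l : List Int) (x : Int) (st : PySem.Set Int × List (Int × Int))
    (ys : List Int) (h : ∀ y ∈ ys, PySem.List.pyGetD l y 0 ≠ PySem.List.pyGetD l x 0) :
    ys.foldl (innerF l x) st = st := by
  induction ys with
  | nil => rfl
  | cons y ys ih =>
    have hy : PySem.List.pyGetD l y 0 ≠ PySem.List.pyGetD l x 0 := h y (List.mem_cons_self ..)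
    have hb : (PySem.List.pyGetD l x 0 == PySem.List.pyGetD l y 0) = false := by
      simp; exact fun e => hy e.symm
    simp only [List.foldl, innerF, hb, Bool.false_and, if_neg Bool.false_ne_true]
    exact ih fun y hm => h y (List.mem_cons_of_mem _ hm)

lemma inner_finds (l : List Int) (x : Int) (st : PySem.Set Int × List (Int × Int))
    (ys₁ ys₂ : List Int) (y₀ : Int)
    (hx : PySem.Set.contains st.1 x = false)
    (hy : PySem.Set.contains st.1 y₀ = false)
    (hv : PySem.List.pyGetD l y₀ 0 = PySem.List.pyGetD l x 0)
    (h1 : ∀ y ∈ ys₁, PySem.List.pyGetD l y 0 ≠ PySem.List.pyGetD l x 0) :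
    (ys₁ ++ y₀ :: ys₂).foldl (innerF l x) st =
      (PySem.Set.add (PySem.Set.add st.1 x) y₀,
       st.2 ++ [(PySem.List.pyGetD l x 0, PySem.List.pyGetD l y₀ 0)]) := by
  rw [List.foldl_append, inner_noop_nomatch l x st ys₁ h1]
  have hx' : x ∉ st.1 := by simpa using hx
  have hy' : y₀ ∉ st.1 := by simpa using hy
  have hstep : innerF l x st y₀ =
      (PySem.Set.add (PySem.Set.add st.1 x) y₀,
       st.2 ++ [(PySem.List.pyGetD l x 0, PySem.List.pyGetD l y₀ 0)]) := by
    simp [innerF, hv, hx', hy']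
  simp only [List.foldl, hstep]
  apply inner_noop_used
  simp [PySem.Set.mem_add]


-- ---- A side: usedBool transitions ----
lemma rank_lt_count (l : List Int) (i : Nat) (hi : i < l.length) :
    (l.take i).count l[i] + 1 ≤ l.count l[i] := by
  have h1 : l.take (i+1) = l.take i ++ [l[i]] := by
    rw [List.take_succ]; simp [List.getElem?_eq_getElem hi]
  have h2 : (l.take (i+1)).count l[i] ≤ l.count l[i] :=
    (List.take_sublist _ _).count_le _
  rw [h1, List.count_append] at h2; simp at h2; omega

lemma rank_inj (l : List Int) (i i' : Nat) (hi : i < l.length) (hi' : i' < l.length)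
    (hne : i ≠ i') (hv : l[i] = l[i']) :
    (l.take i).count l[i] ≠ (l.take i').count l[i] := by
  have mono : ∀ (m m' : Nat) (hmm : m < m') (hm : m < l.length),
      (l.take m).count (l[m]'hm) < (l.take m').count (l[m]'hm) := by
    intro m m' hmm hm
    have h1 : l.take (m+1) = l.take m ++ [l[m]] := by
      rw [List.take_succ]; simp [List.getElem?_eq_getElem hm]
    have hpre : l.take (m+1) <+: l.take m' := List.take_prefix_take_left (by omega)
    have h2 := hpre.sublist.count_le (l[m]'hm)
    rw [h1, List.count_append] at h2; simp at h2; omega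
  rcases Nat.lt_or_ge i i' with h | h
  · have := mono i i' h hi
    omega
  · have hlt : i' < i := by omega
    have := mono i' i hlt hi'
    rw [← hv] at this
    omega

lemma getD_append_mid (p t : List Int) (v : Int) : (p ++ v :: t).getD p.length 0 = v := by
  rw [List.getD_eq_getElem?_getD, List.getElem?_append_right (le_refl _)]
  simp

lemma getD_append_mid' (p t : List Int) (v : Int) (k : Nat) :
    (p ++ v :: t).getD (p.length + 1 + k) 0 = t.getD k 0 := by
  rw [List.getD_eq_getElem?_getD, List.getElem?_append_right (by omega)]
  have : p.length + 1 + k - p.length = k + 1 := by omega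
  rw [this, List.getElem?_cons_succ, ← List.getD_eq_getElem?_getD]

lemma take_mid (p t : List Int) (v : Int) (k : Nat) :
    (p ++ v :: t).take (p.length + 1 + k) = p ++ v :: t.take k := by
  have h1 : p.length + 1 + k = p.length + (1 + k) := by omega
  rw [h1, List.take_length_add_append, show (1+k) = (k+1) from by omega, List.take_succ_cons]

lemma T_odd (p t : List Int) (v : Int) (hodd : p.count v % 2 = 1) (j : Int) :
    usedBool (p ++ v :: t) (p.length + 1) j = usedBool (p ++ v :: t) p.length j := by
  unfold usedBool
  by_cases h : 0 ≤ j ∧ j.toNat < (p ++ v :: t).length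
  · rw [if_pos h, if_pos h]
    obtain ⟨h0, hlt⟩ := h
    set l := p ++ v :: t with hl
    set i := j.toNat with hi
    set w := l.getD i 0 with hw
    set r := (l.take i).count w with hr
    have htake_a : l.take p.length = p := List.take_left ..
    have htake_a1 : l.take (p.length + 1) = p ++ [v] := by
      rw [hl]
      rw [show p.length + 1 = p.length + (1:Nat) from rfl, List.take_length_add_append]
      simp
    by_cases hpar : (r % 2 == 0) = true
    · rw [if_pos hpar, if_pos hpar]
      by_cases hia : i = p.length
      · exfalso
        have hwv : w = v := by rw [hw, hia, hl]; exact getD_append_mid ..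
        have hre : r = p.count v := by rw [hr, hia, htake_a, hwv]
        simp at hpar
        omega
      · rw [show (decide (i < p.length + 1)) = (decide (i < p.length)) from by
          rw [decide_eq_decide]; omega]
    · rw [if_neg hpar, if_neg hpar]
      rw [htake_a1, htake_a]
      have hparr : r % 2 = 1 := by simp at hpar; omega
      by_cases hwv : w = v
      · rw [hwv, List.count_append]
        simp
        omega
      · rw [List.count_append]
        have : List.count w [v] = 0 := by
          simp [List.count_singleton]
          exact fun e => hwv e.symm
        rw [this]
        simp
  · rw [if_neg h, if_neg h]

lemma T_even_nonext (p t : List Int) (v : Int) (heven : p.count v % 2 = 0)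
    (hnm : v ∉ t) (j : Int) :
    usedBool (p ++ v :: t) (p.length + 1) j = usedBool (p ++ v :: t) p.length j := by
  unfold usedBool
  by_cases h : 0 ≤ j ∧ j.toNat < (p ++ v :: t).length
  · rw [if_pos h, if_pos h]
    obtain ⟨h0, hlt⟩ := h
    set l := p ++ v :: t with hl
    set i := j.toNat with hi
    set w := l.getD i 0 with hw
    set r := (l.take i).count w with hr
    have htake_a : l.take p.length = p := List.take_left ..
    have htake_a1 : l.take (p.length + 1) = p ++ [v] := by
      rw [hl, show p.length + 1 = p.length + (1:Nat) from rfl, List.take_length_add_append]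
      simp
    have hcl : l.count v = p.count v + 1 := by
      rw [hl, List.count_append]
      simp [List.count_eq_zero_of_not_mem hnm]
    by_cases hpar : (r % 2 == 0) = true
    · rw [if_pos hpar, if_pos hpar]
      by_cases hia : i = p.length
      · have hwv : w = v := by rw [hw, hia, hl]; exact getD_append_mid ..
        have hre : r = p.count v := by rw [hr, hia, htake_a, hwv]
        rw [hwv, hcl, hre]
        simp
      · rw [show (decide (i < p.length + 1)) = (decide (i < p.length)) from by
          rw [decide_eq_decide]; omega]
    · rw [if_neg hpar, if_neg hpar]
      rw [htake_a1, htake_a]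
      by_cases hwv : w = v
      · have hge : l.getD i 0 = l[i]'hlt := List.getD_eq_getElem l 0 hlt
        have hrk := rank_lt_count l i hlt
        rw [← hge, ← hw, ← hr, hwv] at hrk
        rw [hwv, List.count_append]
        simp
        omega
      · rw [List.count_append]
        have : List.count w [v] = 0 := by
          simp [List.count_singleton]
          exact fun e => hwv e.symm
        rw [this]
        simp
  · rw [if_neg h, if_neg h]

lemma not_mem_take_idxOf (v : Int) (t : List Int) : v ∉ t.take (t.idxOf v) := by
  induction t with
  | nil => simp
  | cons w t ih =>
    by_cases hwv : w = v
    · subst hwv; simp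
    · rw [List.idxOf_cons_ne _ hwv]
      simp [List.take_succ_cons]
      exact ⟨fun e => hwv e.symm, ih⟩

lemma T_even_next (p t : List Int) (v : Int) (heven : p.count v % 2 = 0)
    (hm : v ∈ t) (j : Int) :
    usedBool (p ++ v :: t) (p.length + 1) j =
      (usedBool (p ++ v :: t) p.length j || j == (p.length : Int)
        || j == ((p.length + 1 + t.idxOf v : Nat) : Int)) := by
  have hk : t.idxOf v < t.length := List.idxOf_lt_length_of_mem hm
  set k := t.idxOf v with hkdef
  set y₀ : Nat := p.length + 1 + k with hy₀
  set l := p ++ v :: t with hl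
  have hlen : l.length = p.length + 1 + t.length := by rw [hl]; simp; omega
  have hy₀lt : y₀ < l.length := by omega
  have htake_a : l.take p.length = p := List.take_left ..
  have htake_a1 : l.take (p.length + 1) = p ++ [v] := by
    rw [hl, show p.length + 1 = p.length + (1:Nat) from rfl, List.take_length_add_append]
    simp
  have hgy : l.getD y₀ 0 = v := by
    rw [hl, hy₀, getD_append_mid', List.getD_eq_getElem t 0 hk, List.getElem_idxOf hk]
  have hranky : (l.take y₀).count v = p.count v + 1 := by
    rw [hl, hy₀, take_mid, List.count_append, List.count_cons]
    have : (t.take k).count v = 0 :=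
      List.count_eq_zero_of_not_mem (not_mem_take_idxOf v t)
    simp [this]
  have htc : 0 < t.count v := List.count_pos_iff.mpr hm
  have hcl : l.count v = p.count v + 1 + t.count v := by
    rw [hl, List.count_append, List.count_cons]
    simp
    omega
  unfold usedBool
  by_cases h : 0 ≤ j ∧ j.toNat < l.length
  · rw [if_pos h, if_pos h]
    obtain ⟨h0, hlt⟩ := h
    have hj : j = (j.toNat : Int) := (Int.toNat_of_nonneg h0).symm
    set i := j.toNat with hi
    set w := l.getD i 0 with hw
    set r := (l.take i).count w with hr
    have hgi : l.getD i 0 = l[i]'hlt := List.getD_eq_getElem l 0 hlt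
    by_cases hpar : (r % 2 == 0) = true
    · rw [if_pos hpar, if_pos hpar]
      simp only [beq_iff_eq] at hpar
      have hjy : (j == ((y₀ : Nat) : Int)) = false := by
        rw [beq_eq_false_iff_ne]
        intro e
        have hiy : i = y₀ := by omega
        have hwv : w = v := by rw [hw, hiy]; exact hgy
        have : r = p.count v + 1 := by rw [hr, hiy, hwv]; exact hranky
        omega
      by_cases hia : i = p.length
      · have hja : (j == (p.length : Int)) = true := by
          rw [beq_iff_eq, hj, hia]
        rw [hja, hjy]
        have hwv : w = v := by rw [hw, hia, hl]; exact getD_append_mid ..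
        have hre : r = p.count v := by rw [hr, hia, htake_a, hwv]
        rw [hwv, hcl]
        simp
        omega
      · have hja : (j == (p.length : Int)) = false := by
          rw [beq_eq_false_iff_ne]; omega
        rw [hja, hjy, Bool.or_false, Bool.or_false]
        rw [show decide (i < p.length + 1) = decide (i < p.length) from by
          rw [decide_eq_decide]; omega]
    · rw [if_neg hpar, if_neg hpar]
      rw [htake_a1, htake_a]
      have hparr : r % 2 = 1 := by simp at hpar; omega
      have hja : (j == (p.length : Int)) = false := by
        rw [beq_eq_false_iff_ne]
        intro e
        have hia : i = p.length := by omega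
        have hwv : w = v := by rw [hw, hia, hl]; exact getD_append_mid ..
        have : r = p.count v := by rw [hr, hia, htake_a, hwv]
        omega
      rw [hja, Bool.or_false]
      by_cases hiy : i = y₀
      · have hjy : (j == ((y₀ : Nat) : Int)) = true := by rw [beq_iff_eq, hj, hiy]
        rw [hjy, Bool.or_true]
        have hwv : w = v := by rw [hw, hiy]; exact hgy
        have hre : r = p.count v + 1 := by rw [hr, hiy, hwv]; exact hranky
        rw [hwv, hre, List.count_append]
        simp
      · have hjy : (j == ((y₀ : Nat) : Int)) = false := by
          rw [beq_eq_false_iff_ne]; omega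
        rw [hjy, Bool.or_false]
        by_cases hwv : w = v
        · have hne := rank_inj l i y₀ hlt hy₀lt hiy
            (by rw [← hgi, ← hw, hwv, ← hgy, List.getD_eq_getElem l 0 hy₀lt])
          rw [← hgi, ← hw, ← hr, hwv] at hne
          rw [hranky] at hne
          rw [hwv, List.count_append]
          simp
          omega
        · rw [List.count_append]
          have : List.count w [v] = 0 := by
            simp [List.count_singleton]
            exact fun e => hwv e.symm
          rw [this]
          simp
  · rw [if_neg h, if_neg h]
    have hja : (j == (p.length : Int)) = false := by
      rw [beq_eq_false_iff_ne]
      intro e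
      apply h
      constructor
      · omega
      · rw [e]; simp; omega
    have hjy : (j == ((y₀ : Nat) : Int)) = false := by
      rw [beq_eq_false_iff_ne]
      intro e
      apply h
      constructor
      · omega
      · rw [e]; simp; omega
    rw [hja, hjy]
    rfl

-- ---- A side: outer loop ----
lemma A_loop (l : List Int) :
    ∀ (rest p : List Int), l = p ++ rest →
    ∀ (st : PySem.Set Int × List (Int × Int)),
    (∀ j : Int, PySem.Set.contains st.1 j = usedBool l p.length j) →
    ((PySem.List.pyRange (p.length : Int) (l.length : Int) 1).foldl
        (fun st x =>
          (PySem.List.pyRange (x + 1) (l.length : Int) 1).foldl (innerF l x) st) st).2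
      = st.2 ++ specGo p rest := by
  intro rest
  induction rest with
  | nil =>
    intro p hl st hinv
    rw [PySem.List.pyRange_one_eq_nil (by rw [hl]; simp)]
    simp [specGo]
  | cons v t ih =>
    intro p hl st hinv
    have hlen : l.length = p.length + 1 + t.length := by rw [hl]; simp; omega
    have hab : ((p.length : Int)) < ((l.length : Int)) := by
      have : p.length < l.length := by omega
      exact_mod_cast this
    rw [PySem.List.pyRange_one_cons hab, List.foldl_cons]
    have hga : PySem.List.pyGetD l ((p.length : Int)) 0 = v := by
      rw [PySem.List.pyGetD_natCast, hl, getD_append_mid]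
    have hca := hinv ((p.length : Int))
    have hua : usedBool l p.length ((p.length : Int)) =
        (if p.count v % 2 == 0 then false else true) := by
      unfold usedBool
      rw [if_pos ⟨by omega, by simp; omega⟩]
      simp only [Int.toNat_natCast]
      rw [hl]
      simp only [getD_append_mid, show List.take p.length (p ++ v :: t) = p from List.take_left ..]
      by_cases hpar : (p.count v % 2 == 0) = true
      · rw [if_pos hpar, if_pos hpar]
        simp
      · rw [if_neg hpar, if_neg hpar]
        simp
    by_cases hpar : (p.count v % 2 == 0) = true
    · -- even rank: A pairs index p.length with the next occurrence of v, if any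
      have hnot : st.1.contains ((p.length : Int)) = false := by
        rw [hca, hua, if_pos hpar]
      by_cases hmem : v ∈ t
      · -- next occurrence exists
        have hk : t.idxOf v < t.length := List.idxOf_lt_length_of_mem hmem
        set k := t.idxOf v with hkdef
        set y₀ : Nat := p.length + 1 + k with hy₀def
        have hy₀lt : y₀ < l.length := by omega
        have hcy : ((y₀ : Nat) : Int) = ((p.length : Int)) + 1 + ((k : Nat) : Int) := by
          rw [hy₀def]; push_cast; ring
        have hgy : l.getD y₀ 0 = v := by
          rw [hl, hy₀def, getD_append_mid', List.getD_eq_getElem t 0 hk, List.getElem_idxOf hk]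
        have hgy' : PySem.List.pyGetD l ((y₀ : Nat) : Int) 0 = v := by
          rw [PySem.List.pyGetD_natCast]
          exact hgy
        have hranky : (l.take y₀).count v = p.count v + 1 := by
          rw [hl, hy₀def, take_mid, List.count_append, List.count_cons]
          have : (t.take k).count v = 0 :=
            List.count_eq_zero_of_not_mem (not_mem_take_idxOf v t)
          simp [this]
        have hy₀used : st.1.contains ((y₀ : Nat) : Int) = false := by
          rw [hinv]
          unfold usedBool
          rw [if_pos ⟨by omega, by simp; omega⟩]
          simp only [Int.toNat_natCast]
          simp only [hgy, hranky, show List.take p.length l = p from by rw [hl]; exact List.take_left ..]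
          rw [if_neg (by simp at hpar ⊢; omega)]
          simp
        have hnomatch : ∀ y ∈ PySem.List.pyRange ((p.length : Int) + 1) ((y₀ : Nat) : Int) 1,
            PySem.List.pyGetD l y 0 ≠ PySem.List.pyGetD l ((p.length : Int)) 0 := by
          intro y hy
          rw [PySem.List.mem_pyRange_one] at hy
          rw [hga]
          have h0y : 0 ≤ y := by omega
          have hyn : y = ((y.toNat : Nat) : Int) := (Int.toNat_of_nonneg h0y).symm
          have hyv : y < ((y₀ : Nat) : Int) := hy.2
          rw [hcy] at hyv
          obtain ⟨m, hym⟩ : ∃ m, y.toNat = p.length + 1 + m :=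
            ⟨y.toNat - (p.length + 1), by omega⟩
          have hmk : m < k := by omega
          rw [hyn, PySem.List.pyGetD_natCast, hym, hl, getD_append_mid']
          have hmt : m < t.length := by omega
          rw [List.getD_eq_getElem t 0 hmt]
          have hgt : (t.take k)[m]'(by rw [List.length_take]; omega) = t[m]'hmt :=
            List.getElem_take
          have hmem2 : t[m]'hmt ∈ t.take k := by
            rw [← hgt]; exact List.getElem_mem _
          intro e
          rw [e] at hmem2
          exact not_mem_take_idxOf v t hmem2
        have hsplit : PySem.List.pyRange ((p.length : Int) + 1) ((l.length : Int)) 1 =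
            PySem.List.pyRange ((p.length : Int) + 1) ((y₀ : Nat) : Int) 1 ++
              ((y₀ : Nat) : Int) :: PySem.List.pyRange (((y₀ : Nat) : Int) + 1) ((l.length : Int)) 1 := by
          have h1' : ((p.length : Int)) + 1 ≤ ((y₀ : Nat) : Int) := by rw [hcy]; omega
          have h2' : ((y₀ : Nat) : Int) ≤ ((l.length : Int)) := by exact_mod_cast Nat.le_of_lt hy₀lt
          have h3' : ((y₀ : Nat) : Int) < ((l.length : Int)) := by exact_mod_cast hy₀lt
          rw [PySem.List.pyRange_one_append ((p.length : Int) + 1) ((y₀ : Nat) : Int) ((l.length : Int)) h1' h2']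
          rw [PySem.List.pyRange_one_cons h3']
        have hstep : (PySem.List.pyRange ((p.length : Int) + 1) ((l.length : Int)) 1).foldl
            (innerF l ((p.length : Int))) st =
            (PySem.Set.add (PySem.Set.add st.1 ((p.length : Int))) (((y₀ : Nat) : Int)),
             st.2 ++ [(v, v)]) := by
          rw [hsplit, inner_finds l _ st _ _ _ hnot hy₀used (by rw [hgy', hga]) hnomatch]
          rw [hga, hgy']
        rw [hstep]
        have hinv' : ∀ j : Int,
            (PySem.Set.add (PySem.Set.add st.1 ((p.length : Int))) (((y₀ : Nat) : Int))).contains j =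
              usedBool l (p.length + 1) j := by
          intro j
          have hT := T_even_next p t v (by simpa using hpar) hmem j
          rw [← hl] at hT
          rw [← hkdef, ← hy₀def] at hT
          rw [hT, ← hinv j]
          simp [PySem.Set.mem_add, Bool.or_assoc, beq_eq_decide]
        have hmain := ih (p ++ [v]) (by rw [hl]; simp)
          (PySem.Set.add (PySem.Set.add st.1 ((p.length : Int))) (((y₀ : Nat) : Int)), st.2 ++ [(v, v)])
          (by simpa using hinv')
        rw [show (((p ++ [v]).length : Nat) : Int) = ((p.length : Int)) + 1 from by simp] at hmain
        rw [hmain]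
        simp only [specGo, hpar, hmem, decide_true, Bool.and_self, if_pos]
        simp
      · -- no later occurrence: the inner loop never fires
        have hnomatch : ∀ y ∈ PySem.List.pyRange ((p.length : Int) + 1) ((l.length : Int)) 1,
            PySem.List.pyGetD l y 0 ≠ PySem.List.pyGetD l ((p.length : Int)) 0 := by
          intro y hy
          rw [PySem.List.mem_pyRange_one] at hy
          rw [hga]
          have h0y : 0 ≤ y := by omega
          have hyn : y = ((y.toNat : Nat) : Int) := (Int.toNat_of_nonneg h0y).symm
          have hylt : y.toNat < l.length := by omega
          set m : Nat := y.toNat - (p.length + 1) with hm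
          have hym : y.toNat = p.length + 1 + m := by omega
          rw [hyn, PySem.List.pyGetD_natCast, hym, hl, getD_append_mid']
          have hmt : m < t.length := by omega
          rw [List.getD_eq_getElem t 0 hmt]
          intro e
          exact hmem (e ▸ List.getElem_mem _)
        rw [inner_noop_nomatch l _ st _ hnomatch]
        have hinv' : ∀ j : Int, st.1.contains j = usedBool l (p.length + 1) j := by
          intro j
          have hT := T_even_nonext p t v (by simpa using hpar) hmem j
          rw [← hl] at hT
          rw [hT, hinv j]
        have hmain := ih (p ++ [v]) (by rw [hl]; simp) st (by simpa using hinv')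
        rw [show (((p ++ [v]).length : Nat) : Int) = ((p.length : Int)) + 1 from by simp] at hmain
        rw [hmain]
        simp [specGo, hmem]
    · -- odd rank: index p.length is already paired, the inner loop does nothing
      have hused : st.1.contains ((p.length : Int)) = true := by
        rw [hca, hua, if_neg hpar]
      rw [inner_noop_used l _ st hused]
      have hinv' : ∀ j : Int, st.1.contains j = usedBool l (p.length + 1) j := by
        intro j
        have hT := T_odd p t v (by simp at hpar; omega) j
        rw [← hl] at hT
        rw [hT, hinv j]
      have hmain := ih (p ++ [v]) (by rw [hl]; simp) st (by simpa using hinv')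
      rw [show (((p ++ [v]).length : Nat) : Int) = ((p.length : Int)) + 1 from by simp] at hmain
      rw [hmain]
      have : (p.count v % 2 == 0 && decide (v ∈ t)) = false := by
        simp at hpar ⊢
        omega
      simp [specGo, this]

lemma A_eq_spec (l : List Int) : list_of_occuring_tuples l = specGo [] l := by
  unfold list_of_occuring_tuples
  have h0 : ∀ j : Int, PySem.Set.contains (PySem.Set.empty : PySem.Set Int) j = usedBool l 0 j := by
    intro j
    unfold usedBool
    by_cases h : 0 ≤ j ∧ j.toNat < l.length
    · rw [if_pos h]
      by_cases hpar : ((l.take j.toNat).count (l.getD j.toNat 0) % 2 == 0) = true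
      · rw [if_pos hpar]; simp
      · rw [if_neg hpar]; simp at hpar ⊢; omega
    · rw [if_neg h]; simp
  have := A_loop l l [] (by simp) (PySem.Set.empty, []) h0
  simpa using this

-- ===== VERDICT (by name: the statement is the Claim_ definition above) =====
theorem list_of_occuring_tuples_spec : Claim_equal_list_of_occuring_tuples := by
  intro l _
  unfold Spec_list_of_occuring_tuples
  rw [A_eq_spec, B_eq_spec]
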